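-- pv_equiv track=rewrite | github.com/srth12/Eclipse-Workspace- | Coding Practice/codingpractice/src/main/python/interview/rakutan/rakutan_test.py | solution
-- ===== SOURCE A (Python) =====
-- def solution(A):
--     # write your code in Python 3.6
--     power_set = set()
--     for element in A:
--         while element in power_set:
--             power_set.remove(element)
--             element += 1
--         power_set.add(element)
--
--     return len(power_set)
-- ===== SOURCE B (Python) =====
-- def solution(A):
--     # Adding an element x is adding 2**x; the while-carry cascade is binary addition.
--     # Sort, then sweep once keeping a bounded carry counter instead of simulating a set.
--     xs = sorted(A)
--     if not xs:
--         return 0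
--     e = xs[0]
--     c = 0
--     ones = 0
--     for x in xs:
--         d = x - e
--         if d >= c.bit_length():
--             ones += bin(c).count("1")
--             c = 1
--         else:
--             ones += bin(c & ((1 << d) - 1)).count("1")
--             c = (c >> d) + 1
--         e = x
--     return ones + bin(c).count("1")
-- ===== Notes on version B (the rewrite author's own statement) =====
-- stated objective: alternative
-- what changed: Replaces the set-based carry cascade by sorting the input and sweeping once with a small integer carry counter, counting finalized bits with popcounts (the result is the popcount of sum(2**x)).
import Mathlib
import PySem

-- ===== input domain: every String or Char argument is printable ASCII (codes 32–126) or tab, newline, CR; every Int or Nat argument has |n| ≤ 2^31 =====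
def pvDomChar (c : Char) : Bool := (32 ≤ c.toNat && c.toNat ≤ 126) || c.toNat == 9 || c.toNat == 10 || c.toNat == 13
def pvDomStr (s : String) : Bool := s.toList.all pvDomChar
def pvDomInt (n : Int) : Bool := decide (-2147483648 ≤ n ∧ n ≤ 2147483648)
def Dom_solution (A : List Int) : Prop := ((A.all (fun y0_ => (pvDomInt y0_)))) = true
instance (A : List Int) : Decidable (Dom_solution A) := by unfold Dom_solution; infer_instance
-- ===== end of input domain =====

-- B replaces A's set-based carry cascade by "sort, then one sweep with a small carry counter
-- and popcounts" (alternative algorithm for the same exact result, the popcount of Σ 2^x).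

-- ===== PORT A =====
-- termination helper for the while-loop: removing a member shrinks the set
theorem pvDiscard_length_lt (s : List Int) (e : Int) (h : e ∈ s) :
    (PySem.Set.discard s e).length < s.length := by
  induction s with
  | nil => cases h
  | cons a t ih =>
    by_cases ha : a = e
    · subst ha
      simp only [PySem.Set.discard, List.filter_cons, beq_self_eq_true, Bool.not_true,
        List.length_cons]
      exact Nat.lt_succ_of_le (List.length_filter_le _ _)
    · have he : e ∈ t := by
        rcases List.mem_cons.mp h with h2 | h2
        · exact absurd h2.symm ha
        · exact h2
      have := ih he
      simp only [PySem.Set.discard, List.filter_cons] at *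
      have hbeq : (a == e) = false := beq_false_of_ne ha
      simp [hbeq] at *
      omega

-- the 'while element in power_set: remove; element += 1' loop
def pvCarryLoop (ps : PySem.Set Int) (e : Int) : PySem.Set Int × Int :=
  if h : PySem.Set.contains ps e = true then
    pvCarryLoop (PySem.Set.discard ps e) (e + 1)
  else (ps, e)
termination_by ps.length
decreasing_by
  exact pvDiscard_length_lt ps e (by simpa [PySem.Set.contains_iff] using h)

def pvStepA (ps : PySem.Set Int) (el : Int) : PySem.Set Int :=
  let r := pvCarryLoop ps el
  PySem.Set.add r.1 r.2

def solution (A : List Int) : Int :=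
  ((A.foldl pvStepA PySem.Set.empty).length : Int)

-- ===== PORT B =====
def pvStepB (s : Int × Int × Int) (x : Int) : Int × Int × Int :=
  let e := s.1; let c := s.2.1; let ones := s.2.2
  let d := x - e
  if (PySem.Int.bitLength c : Int) ≤ d then
    (x, 1, ones + (PySem.Int.bitCount c : Int))
  else
    (x, (c >>> d.toNat) + 1,
      ones + (PySem.Int.bitCount (PySem.Int.band c ((1 <<< d.toNat) - 1)) : Int))

def solution_alt (A : List Int) : Int :=
  let xs := PySem.List.sorted A (fun x => x) false
  match xs with
  | [] => 0
  | x0 :: _ =>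
    let r := xs.foldl pvStepB (x0, 0, 0)
    r.2.2 + (PySem.Int.bitCount r.2.1 : Int)

-- ===== PRECONDITION & SPEC =====
def Spec_solution (A : List Int) (out : Int) : Prop := out = solution_alt A
instance (A : List Int) (out : Int) : Decidable (Spec_solution A out) := by unfold Spec_solution; infer_instance

-- ===== CLAIM (what is proved, stated in full; the proofs are below) =====
def Claim_equal_solution : Prop := ∀ (A : List Int), Dom_solution A → Spec_solution A (solution A)

-- ===== LEMMAS AND PROOFS =====

-- valuation: a set of exponents as the dyadic rational Σ 2^s
def pvV (S : Finset ℤ) : ℚ := ∑ s ∈ S, (2:ℚ) ^ s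
def pvVL (l : List ℤ) : ℚ := (l.map (fun s => (2:ℚ) ^ s)).sum

theorem pvZpow_pos (s : ℤ) : 0 < (2:ℚ) ^ s := zpow_pos (by norm_num) s

theorem pvVL_cons (x : ℤ) (l : List ℤ) : pvVL (x :: l) = (2:ℚ) ^ x + pvVL l := by
  simp [pvVL]

theorem pvV_toFinset (l : List ℤ) (h : l.Nodup) : pvV l.toFinset = pvVL l := by
  unfold pvV pvVL
  rw [List.sum_toFinset _ h]

theorem pvV_pos {S : Finset ℤ} (h : S.Nonempty) : 0 < pvV S :=
  Finset.sum_pos (fun s _ => pvZpow_pos s) h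

theorem pvV_bound : ∀ (n : ℕ) (S : Finset ℤ) (m : ℤ), S.card = n → (∀ s ∈ S, s ≤ m) →
    pvV S < (2:ℚ) ^ (m + 1) := by
  intro n
  induction n using Nat.strong_induction_on with
  | _ n ih =>
    intro S m hcard hle
    rcases S.eq_empty_or_nonempty with rfl | hne
    · simpa [pvV] using pvZpow_pos (m + 1)
    · set M := S.max' hne with hM
      have hMS : M ∈ S := S.max'_mem hne
      have hsplit : pvV S = (2:ℚ) ^ M + pvV (S.erase M) := by
        unfold pvV
        rw [← Finset.add_sum_erase _ _ hMS]
      have hlt : pvV (S.erase M) < (2:ℚ) ^ M := by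
        have h1 : (S.erase M).card < n := by
          rw [← hcard]
          exact Finset.card_erase_lt_of_mem hMS
        have h2 : ∀ s ∈ S.erase M, s ≤ M - 1 := by
          intro s hs
          have hsS := Finset.mem_of_mem_erase hs
          have hne' := Finset.ne_of_mem_erase hs
          have := S.le_max' s hsS
          omega
        have := ih _ h1 (S.erase M) (M - 1) rfl h2
        simpa using this
      have hMm : M ≤ m := S.max'_le _ _ hle
      calc pvV S < (2:ℚ) ^ M + (2:ℚ) ^ M := by rw [hsplit]; linarith
        _ = (2:ℚ) ^ (M + 1) := by rw [zpow_add_one₀ (by norm_num : (2:ℚ) ≠ 0)]; ring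
        _ ≤ (2:ℚ) ^ (m + 1) := zpow_le_zpow_right₀ (by norm_num) (by omega)

theorem pvV_single_le {S : Finset ℤ} {s : ℤ} (h : s ∈ S) : (2:ℚ) ^ s ≤ pvV S :=
  Finset.single_le_sum (fun t _ => le_of_lt (pvZpow_pos t)) h

-- uniqueness of the binary representation over ℤ exponents
theorem pvV_inj : ∀ (n : ℕ) (S T : Finset ℤ), S.card = n → pvV S = pvV T → S = T := by
  intro n
  induction n using Nat.strong_induction_on with
  | _ n ih =>
    intro S T hcard heq
    rcases S.eq_empty_or_nonempty with rfl | hS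
    · rcases T.eq_empty_or_nonempty with rfl | hT
      · rfl
      · have := pvV_pos hT
        rw [← heq] at this
        simp [pvV] at this
    · have hT : T.Nonempty := by
        by_contra h
        rw [Finset.not_nonempty_iff_eq_empty] at h
        subst h
        have := pvV_pos hS
        rw [heq] at this
        simp [pvV] at this
      set M := S.max' hS with hM
      set N := T.max' hT with hN
      have hMN : M = N := by
        by_contra hne
        rcases lt_or_gt_of_ne hne with h | h
        · have h1 : pvV S < (2:ℚ) ^ (M + 1) :=
            pvV_bound S.card S M rfl (fun s hs => S.le_max' s hs)
          have h2 : (2:ℚ) ^ (M + 1) ≤ (2:ℚ) ^ N := zpow_le_zpow_right₀ (by norm_num) (by omega)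
          have h3 : (2:ℚ) ^ N ≤ pvV T := pvV_single_le (T.max'_mem hT)
          rw [heq] at h1; linarith
        · have h1 : pvV T < (2:ℚ) ^ (N + 1) :=
            pvV_bound T.card T N rfl (fun s hs => T.le_max' s hs)
          have h2 : (2:ℚ) ^ (N + 1) ≤ (2:ℚ) ^ M := zpow_le_zpow_right₀ (by norm_num) (by omega)
          have h3 : (2:ℚ) ^ M ≤ pvV S := pvV_single_le (S.max'_mem hS)
          rw [heq] at h3; linarith
      have hMS : M ∈ S := S.max'_mem hS
      have hNT : M ∈ T := by rw [hMN]; exact T.max'_mem hT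
      have herase : pvV (S.erase M) = pvV (T.erase M) := by
        have h1 : pvV S = (2:ℚ) ^ M + pvV (S.erase M) := by
          unfold pvV; rw [← Finset.add_sum_erase _ _ hMS]
        have h2 : pvV T = (2:ℚ) ^ M + pvV (T.erase M) := by
          unfold pvV; rw [← Finset.add_sum_erase _ _ hNT]
        rw [h1, h2] at heq
        linarith
      have hc : (S.erase M).card < n := by
        rw [← hcard]; exact Finset.card_erase_lt_of_mem hMS
      have := ih _ hc (S.erase M) (T.erase M) rfl herase
      calc S = insert M (S.erase M) := (Finset.insert_erase hMS).symm
        _ = insert M (T.erase M) := by rw [this]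
        _ = T := Finset.insert_erase hNT

-- ===== A-side: the set simulation preserves Nodup and the valuation =====

theorem pvVL_discard (e : Int) : ∀ (s : List Int), s.Nodup → e ∈ s →
    pvVL (PySem.Set.discard s e) + (2:ℚ) ^ e = pvVL s := by
  intro s
  induction s with
  | nil => intro _ h; cases h
  | cons a t ih =>
    intro hnd hmem
    by_cases ha : a = e
    · subst ha
      have hnotin : a ∉ t := (List.nodup_cons.mp hnd).1
      have : PySem.Set.discard (a :: t) a = t := by
        simp only [PySem.Set.discard, List.filter_cons, beq_self_eq_true, Bool.not_true]
        exact List.filter_eq_self.mpr (fun y hy => by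
          simp only [Bool.not_eq_eq_eq_not, Bool.not_true, beq_eq_false_iff_ne]
          exact fun hye => hnotin (hye ▸ hy))
      rw [this, pvVL_cons]
      ring
    · have he : e ∈ t := by
        rcases List.mem_cons.mp hmem with h2 | h2
        · exact absurd h2.symm ha
        · exact h2
      have hnd' : t.Nodup := (List.nodup_cons.mp hnd).2
      have : PySem.Set.discard (a :: t) e = a :: PySem.Set.discard t e := by
        simp [PySem.Set.discard, beq_false_of_ne ha]
      rw [this, pvVL_cons, pvVL_cons, ← ih hnd' he]
      ring

theorem pvCarryLoop_spec : ∀ (s : PySem.Set Int) (e : Int), s.Nodup →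
    (pvCarryLoop s e).1.Nodup ∧ (pvCarryLoop s e).2 ∉ (pvCarryLoop s e).1 ∧
    pvVL (pvCarryLoop s e).1 + (2:ℚ) ^ ((pvCarryLoop s e).2) = pvVL s + (2:ℚ) ^ e := by
  intro s e
  induction s, e using pvCarryLoop.induct with
  | case1 s e hc ih =>
    intro hnd
    have hmem : e ∈ s := by simpa [PySem.Set.contains_iff] using hc
    have hnd' : (PySem.Set.discard s e).Nodup := by
      simpa [PySem.Set.discard] using List.Nodup.filter _ hnd
    obtain ⟨h1, h2, h3⟩ := ih hnd'
    rw [pvCarryLoop, dif_pos hc]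
    refine ⟨h1, h2, ?_⟩
    rw [h3]
    have hd := pvVL_discard e s hnd hmem
    have h2e : (2:ℚ) ^ (e + 1) = 2 ^ e + 2 ^ e := by
      rw [zpow_add_one₀ (by norm_num : (2:ℚ) ≠ 0)]; ring
    linarith
  | case2 s e hc =>
    intro hnd
    rw [pvCarryLoop, dif_neg hc]
    refine ⟨hnd, ?_, rfl⟩
    simpa [PySem.Set.contains_iff] using hc

theorem pvFoldA_spec : ∀ (A : List Int) (s : PySem.Set Int), s.Nodup →
    (A.foldl pvStepA s).Nodup ∧ pvVL (A.foldl pvStepA s) = pvVL s + pvVL A := by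
  intro A
  induction A with
  | nil => intro s h; simpa [pvVL] using h
  | cons x t ih =>
    intro s hnd
    obtain ⟨h1, h2, h3⟩ := pvCarryLoop_spec s x hnd
    have hstep : pvStepA s x = (pvCarryLoop s x).1 ++ [(pvCarryLoop s x).2] := by
      simp only [pvStepA]
      exact PySem.Set.add_of_not_mem h2
    have hndstep : (pvStepA s x).Nodup := by
      rw [hstep]
      refine List.Nodup.append h1 (List.nodup_singleton _) ?_
      intro a ha hb
      simp only [List.mem_singleton] at hb
      subst hb
      exact h2 ha
    have hvstep : pvVL (pvStepA s x) = pvVL s + (2:ℚ) ^ x := by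
      rw [hstep]
      simp only [pvVL, List.map_append, List.sum_append, List.map_cons, List.map_nil,
        List.sum_cons, List.sum_nil]
      have := h3
      simp only [pvVL] at this
      linarith
    obtain ⟨g1, g2⟩ := ih (pvStepA s x) hndstep
    refine ⟨by simpa using g1, ?_⟩
    simp only [List.foldl_cons]
    rw [g2, hvstep, pvVL_cons]
    ring

-- ===== B-side: bit machinery =====

theorem pvBitIndices_length : ∀ n : ℕ, n.bitIndices.length = PySem.Int.bitCount (n : ℤ) := by
  intro n
  induction n using Nat.strong_induction_on with
  | _ n ih =>
    rcases Nat.eq_zero_or_pos n with rfl | hpos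
    · simp [PySem.Int.bitCount_zero]
    · have hrec := PySem.Int.bitCount_natCast hpos
      have hdm : 2 * (n / 2) + n % 2 = n := by omega
      have hlt : n / 2 < n := Nat.div_lt_self hpos (by norm_num)
      rcases Nat.mod_two_eq_zero_or_one n with h0 | h1
      · have hn : n = 2 * (n / 2) := by omega
        rw [hrec, h0]
        conv_lhs => rw [hn]
        rw [Nat.bitIndices_two_mul, List.length_map, ih _ hlt]
        omega
      · have hn : n = 2 * (n / 2) + 1 := by omega
        rw [hrec, h1]
        conv_lhs => rw [hn]
        rw [Nat.bitIndices_two_mul_add_one, List.length_cons, List.length_map, ih _ hlt]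
        omega

-- the finset { e + i : bit i of n is set }
def pvShift (n : ℕ) (e : ℤ) : Finset ℤ := (n.bitIndices.map (fun i : ℕ => e + (i:ℤ))).toFinset

theorem pvShift_nodup (n : ℕ) (e : ℤ) : (n.bitIndices.map (fun i : ℕ => e + (i:ℤ))).Nodup := by
  refine List.Nodup.map ?_ Nat.bitIndices_nodup
  intro a b h
  simp only at h
  omega

theorem pvShift_card (n : ℕ) (e : ℤ) : (pvShift n e).card = PySem.Int.bitCount (n : ℤ) := by
  rw [pvShift, List.toFinset_card_of_nodup (pvShift_nodup n e), List.length_map,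
    pvBitIndices_length]

theorem pvShift_mem {n : ℕ} {e y : ℤ} :
    y ∈ pvShift n e ↔ ∃ i ∈ n.bitIndices, y = e + (i:ℤ) := by
  simp [pvShift, eq_comm]

theorem pvShift_val (n : ℕ) (e : ℤ) : pvV (pvShift n e) = (n : ℚ) * (2:ℚ) ^ e := by
  rw [pvV, pvShift, List.sum_toFinset _ (pvShift_nodup n e), List.map_map]
  have h1 : ((fun s : ℤ => (2:ℚ) ^ s) ∘ fun i : ℕ => e + (i : ℤ)) =
      fun i : ℕ => (2:ℚ) ^ e * (((2:ℕ) ^ i : ℕ) : ℚ) := by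
    funext i
    simp only [Function.comp_apply]
    rw [zpow_add₀ (by norm_num : (2:ℚ) ≠ 0), zpow_natCast]
    push_cast
    ring
  rw [h1]
  have h2 : (fun i : ℕ => (2:ℚ) ^ e * (((2:ℕ) ^ i : ℕ) : ℚ)) =
      fun i : ℕ => (2:ℚ) ^ e * (((fun m : ℕ => (m : ℚ)) ∘ fun i : ℕ => (2:ℕ) ^ i) i) := rfl
  rw [h2, List.sum_map_mul_left, ← List.map_map, ← Nat.cast_list_sum, Nat.twoPowSum_bitIndices]
  ring

theorem pvShift_lt {n d : ℕ} {e y : ℤ} (h : n < 2 ^ d) (hy : y ∈ pvShift n e) : y < e + d := by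
  rw [pvShift_mem] at hy
  obtain ⟨i, hi, rfl⟩ := hy
  have h2 : 2 ^ i ≤ n := Nat.two_pow_le_of_mem_bitIndices hi
  have : i < d := by
    by_contra hid
    have : 2 ^ d ≤ 2 ^ i := Nat.pow_le_pow_right (by norm_num) (by omega)
    omega
  omega

theorem pvShift_ge {n : ℕ} {e y : ℤ} (hy : y ∈ pvShift n e) : e ≤ y := by
  rw [pvShift_mem] at hy
  obtain ⟨i, _, rfl⟩ := hy
  omega

-- one step of B, in unified form: let d = x - e ≥ 0; finalize the low d bits of c
theorem pvStepB_eq {e c x : ℤ} (ones : ℤ) (hc : 0 ≤ c) (hex : e ≤ x) :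
    pvStepB (e, c, ones) x =
      (x, ((c.toNat / 2 ^ (x - e).toNat : ℕ) : ℤ) + 1,
        ones + (PySem.Int.bitCount ((c.toNat % 2 ^ (x - e).toNat : ℕ) : ℤ) : ℤ)) := by
  set d : ℕ := (x - e).toNat with hd
  have hxe : x - e = (d : ℤ) := by omega
  by_cases hb : (PySem.Int.bitLength c : Int) ≤ x - e
  · -- then-branch: c < 2^d so low = c, high = 0
    have hbl : PySem.Int.bitLength c ≤ d := by omega
    have hlt : c.toNat < 2 ^ d := by
      have h1 := PySem.Int.lt_two_pow_bitLength c
      have h2 : (2:ℕ) ^ PySem.Int.bitLength c ≤ 2 ^ d := Nat.pow_le_pow_right (by norm_num) hbl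
      have h3 : c.natAbs = c.toNat := by omega
      omega
    have hmod : c.toNat % 2 ^ d = c.toNat := Nat.mod_eq_of_lt hlt
    have hdiv : c.toNat / 2 ^ d = 0 := Nat.div_eq_of_lt hlt
    simp only [pvStepB, if_pos hb, hmod, hdiv]
    have : ((c.toNat : ℕ) : ℤ) = c := by omega
    rw [this]
    norm_num
  · -- else-branch: shift and mask compute div and mod
    simp only [pvStepB, if_neg hb, ← hd]
    have hshift : c >>> d = ((c.toNat >>> d : ℕ) : ℤ) := by
      have hce : c = ((c.toNat : ℕ) : ℤ) := by omega
      rw [hce]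
      simp [Int.natCast_shiftRight]
    have hband : PySem.Int.band c ((((1 <<< d : ℕ) : ℤ)) - 1) = ((c.toNat % 2 ^ d : ℕ) : ℤ) := by
      rw [Nat.one_shiftLeft]
      have h2 : (((2 ^ d : ℕ) : ℤ)) - 1 = ((2 ^ d - 1 : ℕ) : ℤ) := by
        have : (1:ℕ) ≤ 2 ^ d := Nat.one_le_two_pow
        omega
      rw [h2, PySem.Int.band_of_nonneg hc (by positivity)]
      congr 1
      have htn : ((2 ^ d - 1 : ℕ) : ℤ).toNat = 2 ^ d - 1 := by
        have : (1:ℕ) ≤ 2 ^ d := Nat.one_le_two_pow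
        omega
      rw [htn, Nat.and_two_pow_sub_one_eq_mod]
    rw [hshift, hband, Nat.shiftRight_eq_div_pow]

-- B's sweep invariant: the accumulated ones + current counter describe THE finset of the total
theorem pvFoldB_spec : ∀ (rest : List ℤ) (e c ones : ℤ) (G : Finset ℤ),
    0 ≤ c → (∀ g ∈ G, g < e) → (∀ y ∈ rest, e ≤ y) → rest.Pairwise (· ≤ ·) →
    ones = (G.card : ℤ) →
    ∃ U : Finset ℤ,
      (rest.foldl pvStepB (e, c, ones)).2.2 +
        (PySem.Int.bitCount ((rest.foldl pvStepB (e, c, ones)).2.1) : ℤ) = (U.card : ℤ) ∧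
      pvV U = pvV G + (c : ℚ) * (2:ℚ) ^ e + pvVL rest := by
  intro rest
  induction rest with
  | nil =>
    intro e c ones G hc hG _ _ hones
    refine ⟨G ∪ pvShift c.toNat e, ?_, ?_⟩
    · have hdisj : Disjoint G (pvShift c.toNat e) := by
        rw [Finset.disjoint_left]
        intro y hyG hyS
        exact absurd (pvShift_ge hyS) (by have := hG y hyG; omega)
      rw [Finset.card_union_of_disjoint hdisj, pvShift_card]
      have : ((c.toNat : ℕ) : ℤ) = c := by omega
      rw [this]
      simp only [List.foldl_nil]
      omega
    · have hdisj : Disjoint G (pvShift c.toNat e) := by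
        rw [Finset.disjoint_left]
        intro y hyG hyS
        exact absurd (pvShift_ge hyS) (by have := hG y hyG; omega)
      rw [pvV, Finset.sum_union hdisj, ← pvV, ← pvV, pvShift_val]
      have : ((c.toNat : ℕ) : ℚ) = (c : ℚ) := by
        have : ((c.toNat : ℕ) : ℤ) = c := by omega
        exact_mod_cast this
      rw [this]
      simp [pvVL]
  | cons x rest' ih =>
    intro e c ones G hc hG hrest hpw hones
    have hex : e ≤ x := hrest x (List.mem_cons_self ..)
    set d : ℕ := (x - e).toNat with hd
    set low : ℕ := c.toNat % 2 ^ d with hlow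
    set high : ℕ := c.toNat / 2 ^ d with hhigh
    have hstep := pvStepB_eq ones hc hex
    have hlow2 : low < 2 ^ d := Nat.mod_lt _ (by positivity)
    set G' : Finset ℤ := G ∪ pvShift low e with hG'
    have hdisj : Disjoint G (pvShift low e) := by
      rw [Finset.disjoint_left]
      intro y hyG hyS
      exact absurd (pvShift_ge hyS) (by have := hG y hyG; omega)
    have hG'lt : ∀ g ∈ G', g < x := by
      intro g hg
      rcases Finset.mem_union.mp hg with h | h
      · have := hG g h; omega
      · have := pvShift_lt hlow2 h
        omega
    have hones' : ones + (PySem.Int.bitCount ((low : ℕ) : ℤ) : ℤ) = (G'.card : ℤ) := by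
      rw [hG', Finset.card_union_of_disjoint hdisj, pvShift_card]
      omega
    have hrest' : ∀ y ∈ rest', x ≤ y := by
      intro y hy
      exact (List.pairwise_cons.mp hpw).1 y hy
    have hpw' : rest'.Pairwise (· ≤ ·) := (List.pairwise_cons.mp hpw).2
    obtain ⟨U, hU1, hU2⟩ := ih x (((high : ℕ) : ℤ) + 1)
      (ones + (PySem.Int.bitCount ((low : ℕ) : ℤ) : ℤ)) G'
      (by positivity) hG'lt hrest' hpw' hones'
    refine ⟨U, ?_, ?_⟩
    · rw [List.foldl_cons, hstep]
      exact hU1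
    · rw [hU2]
      have hVG' : pvV G' = pvV G + (low : ℚ) * (2:ℚ) ^ e := by
        rw [hG', pvV, Finset.sum_union hdisj, ← pvV, ← pvV, pvShift_val]
      have h1 : (2 ^ d * high + low : ℕ) = c.toNat := by
        rw [hhigh, hlow]; exact Nat.div_add_mod _ _
      have h2 : ((2 ^ d * high + low : ℕ) : ℤ) = c := by rw [h1]; omega
      have hcq := congrArg (fun z : ℤ => (z : ℚ)) h2
      push_cast at hcq
      have h2x : (2:ℚ) ^ x = (2:ℚ) ^ e * ((2 ^ d : ℕ) : ℚ) := by
        rw [show x = e + (d : ℤ) by omega, zpow_add₀ (by norm_num : (2:ℚ) ≠ 0), zpow_natCast]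
        push_cast
        ring
      rw [hVG', pvVL_cons, ← hcq, h2x]
      push_cast
      ring

-- ===== assembly =====

theorem pvVL_perm {l l' : List ℤ} (h : l.Perm l') : pvVL l = pvVL l' :=
  List.Perm.sum_eq (List.Perm.map _ h)

theorem pv_main (A : List Int) : solution A = solution_alt A := by
  obtain ⟨hF1, hF2⟩ := pvFoldA_spec A PySem.Set.empty List.nodup_nil
  rcases hxs : PySem.List.sorted A (fun x => x) false with _ | ⟨x0, t⟩
  · have hA : A = [] := (PySem.List.sorted_eq_nil_iff A (fun x => x) false).mp hxs
    subst hA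
    decide
  · have hperm := PySem.List.sorted_perm A (fun x => x) false
    rw [hxs] at hperm
    have hpw : (x0 :: t).Pairwise (· ≤ ·) := by
      have h := PySem.List.sorted_pairwise A (fun x => x)
      rw [hxs] at h
      exact h
    have hge : ∀ y ∈ (x0 :: t), x0 ≤ y := by
      intro y hy
      rcases List.mem_cons.mp hy with rfl | hy'
      · exact le_refl y
      · exact (List.pairwise_cons.mp hpw).1 y hy'
    obtain ⟨U, hU1, hU2⟩ := pvFoldB_spec (x0 :: t) x0 0 0 ∅ le_rfl (by simp) hge hpw (by simp)
    have halt : solution_alt A = (U.card : ℤ) := by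
      simp only [solution_alt, hxs]
      exact hU1
    have hlen : solution A = ((A.foldl pvStepA PySem.Set.empty).toFinset.card : ℤ) := by
      rw [solution, List.toFinset_card_of_nodup hF1]
    have hvF : pvV (A.foldl pvStepA PySem.Set.empty).toFinset = pvVL A := by
      rw [pvV_toFinset _ hF1, hF2]
      simp [pvVL, PySem.Set.empty]
    have hvU : pvV U = pvVL A := by
      rw [hU2, pvVL_perm hperm]
      simp [pvV]
    have hUF : U = (A.foldl pvStepA PySem.Set.empty).toFinset :=
      pvV_inj U.card U _ rfl (by rw [hvU, hvF])
    rw [halt, hlen, hUF]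

-- ===== VERDICT (by name: the statement is the Claim_ definition above) =====
theorem solution_spec : Claim_equal_solution := by
  intro A _
  unfold Spec_solution
  exact pv_main A
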